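-- pv_equiv track=rewrite | github.com/skarodev/skaro | src/skaro_core/phases/_fix_base.py | _strip_task_proposals
-- ===== SOURCE A (Python) =====
-- def _strip_task_proposals(text: str) -> str:
--     """Remove ``--- TASKS ---`` blocks from visible text."""
--     lines = text.splitlines(True)
--     result: list[str] = []
--     i = 0
--     while i < len(lines):
--         stripped = lines[i].strip()
--         if stripped == "--- TASKS ---":
--             i += 1
--             while i < len(lines):
--                 if lines[i].strip() == "--- END TASKS ---":
--                     i += 1
--                     break
--                 i += 1
--         else:
--             result.append(lines[i])
--             i += 1
--     return "".join(result)
-- ===== SOURCE B (Python) =====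
-- def _strip_task_proposals(text: str) -> str:
--     """Remove ``--- TASKS ---`` blocks from visible text."""
--     def go(lines):
--         stripped = [l.strip() for l in lines]
--         if "--- TASKS ---" not in stripped:
--             return lines
--         s = stripped.index("--- TASKS ---")
--         pre = lines[:s]
--         tail = stripped[s + 1:]
--         if "--- END TASKS ---" not in tail:
--             return pre
--         e = tail.index("--- END TASKS ---")
--         return pre + go(lines[s + 1 + e + 1:])
--     return "".join(go(text.splitlines(True)))
-- ===== Notes on version B (the rewrite author's own statement) =====
-- stated objective: alternative
-- what changed: Instead of a line-by-line loop with an index/skip state, B recursively locates the next start/end marker with list.index and splices the slices before and after each block.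
import Mathlib
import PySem

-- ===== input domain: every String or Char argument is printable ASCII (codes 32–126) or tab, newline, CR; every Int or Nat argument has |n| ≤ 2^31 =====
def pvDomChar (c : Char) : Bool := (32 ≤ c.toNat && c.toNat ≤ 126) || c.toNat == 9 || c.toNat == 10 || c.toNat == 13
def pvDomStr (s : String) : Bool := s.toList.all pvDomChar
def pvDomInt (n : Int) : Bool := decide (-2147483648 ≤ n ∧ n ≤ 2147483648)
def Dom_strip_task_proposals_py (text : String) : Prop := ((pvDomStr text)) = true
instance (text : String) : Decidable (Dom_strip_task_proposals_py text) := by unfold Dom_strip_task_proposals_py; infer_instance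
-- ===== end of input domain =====

-- B replaces A's line-by-line loop with index/skip state by a recursive marker search:
-- it finds the next start/end marker with list.index and splices the slices around each block (alternative decomposition, same O(n)).

-- shared helper: text.splitlines(True) (keepends), hand-ported; exact on the ASCII domain,
-- where the only line-break characters are '\n', '\r' and "\r\n"
def pvSplitKeep (cur : List Char) : List Char → List (List Char)
  | [] => if cur = [] then [] else [cur.reverse]
  | '\r' :: '\n' :: rest => (cur.reverse ++ ['\r', '\n']) :: pvSplitKeep [] rest
  | '\n' :: rest => (cur.reverse ++ ['\n']) :: pvSplitKeep [] rest
  | '\r' :: rest => (cur.reverse ++ ['\r']) :: pvSplitKeep [] rest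
  | c :: rest => pvSplitKeep (c :: cur) rest

def pvTASKS : List Char := "--- TASKS ---".toList
def pvENDTASKS : List Char := "--- END TASKS ---".toList

-- ===== PORT A =====
-- A's inner 'while i < len(lines): ... break' skip loop
def pvSkipInner : List (List Char) → List (List Char)
  | [] => []
  | l :: rest => if PySem.Chars.strip l == pvENDTASKS then rest else pvSkipInner rest

theorem pvSkipInner_length_le (xs : List (List Char)) : (pvSkipInner xs).length ≤ xs.length := by
  induction xs with
  | nil => simp [pvSkipInner]
  | cons l rest ih => simp only [pvSkipInner]; split_ifs <;> simp <;> omega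

-- A's outer while loop over the remaining lines
def pvStripA : List (List Char) → List (List Char)
  | [] => []
  | l :: rest =>
    if PySem.Chars.strip l == pvTASKS then pvStripA (pvSkipInner rest)
    else l :: pvStripA rest
termination_by xs => xs.length
decreasing_by
  · simpa using Nat.lt_succ_of_le (pvSkipInner_length_le rest)
  · simp

def strip_task_proposals_py (text : String) : String :=
  String.ofList (PySem.Chars.join [] (pvStripA (pvSplitKeep [] text.toList)))

-- ===== PORT B =====
-- B's recursive helper 'go': find the next start marker ('in'/'.index' on the stripped lines
-- ported as findIdx? over the strip of each line), keep the slice before it, find the end marker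
-- after it, and recurse on the slice after the block (lines[:s] = take s, lines[k:] = drop k)
theorem pv_findIdx?_lt_length {α : Type} (p : α → Bool) (xs : List α) (i : Nat)
    (h : xs.findIdx? p = some i) : i < xs.length := by
  induction xs generalizing i with
  | nil => simp [List.findIdx?, List.findIdx?.go] at h
  | cons x xs ih =>
      rw [List.findIdx?_cons] at h
      split_ifs at h
      · simp only [Option.some.injEq] at h; simp only [List.length_cons]; omega
      · simp only [Option.map_eq_some_iff] at h
        obtain ⟨j, hj, rfl⟩ := h
        simpa using ih j hj

def pvGoB (lines : List (List Char)) : List (List Char) :=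
  match hs : lines.findIdx? (fun l => PySem.Chars.strip l == pvTASKS) with
  | none => lines
  | some s =>
    let pre := lines.take s
    let tail := lines.drop (s + 1)
    match tail.findIdx? (fun l => PySem.Chars.strip l == pvENDTASKS) with
    | none => pre
    | some e => pre ++ pvGoB (tail.drop (e + 1))
termination_by lines.length
decreasing_by
  have hslt := pv_findIdx?_lt_length _ _ _ hs
  simp only [List.length_drop]
  omega

def strip_task_proposals_py_alt (text : String) : String :=
  String.ofList (PySem.Chars.join [] (pvGoB (pvSplitKeep [] text.toList)))

-- ===== PRECONDITION & SPEC =====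
def Spec_strip_task_proposals_py (text : String) (out : String) : Prop := out = strip_task_proposals_py_alt text
instance (text : String) (out : String) : Decidable (Spec_strip_task_proposals_py text out) := by unfold Spec_strip_task_proposals_py; infer_instance

-- ===== CLAIM (what is proved, stated in full; the proofs are below) =====
def Claim_equal_strip_task_proposals_py : Prop := ∀ (text : String), Dom_strip_task_proposals_py text → Spec_strip_task_proposals_py text (strip_task_proposals_py text)

-- ===== LEMMAS AND PROOFS =====

-- no start marker anywhere: A emits every line
theorem pvStripA_no_marker (lines : List (List Char))
    (h : lines.findIdx? (fun l => PySem.Chars.strip l == pvTASKS) = none) :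
    pvStripA lines = lines := by
  induction lines with
  | nil => simp [pvStripA]
  | cons l rest ih =>
      rw [List.findIdx?_cons] at h
      split_ifs at h with hl
      · simp only [pvStripA, hl, Bool.false_eq_true, if_false]
        rw [ih (by simpa using h)]

-- A's skip loop is 'drop everything up to and including the first end marker'
theorem pvSkipInner_none (rest : List (List Char))
    (h : rest.findIdx? (fun l => PySem.Chars.strip l == pvENDTASKS) = none) :
    pvSkipInner rest = [] := by
  induction rest with
  | nil => simp [pvSkipInner]
  | cons l xs ih =>
      rw [List.findIdx?_cons] at h
      split_ifs at h with hl
      · simp only [pvSkipInner, hl, Bool.false_eq_true, if_false]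
        exact ih (by simpa using h)

theorem pvSkipInner_some (rest : List (List Char)) (e : Nat)
    (h : rest.findIdx? (fun l => PySem.Chars.strip l == pvENDTASKS) = some e) :
    pvSkipInner rest = rest.drop (e + 1) := by
  induction rest generalizing e with
  | nil => simp [List.findIdx?, List.findIdx?.go] at h
  | cons l xs ih =>
      rw [List.findIdx?_cons] at h
      split_ifs at h with hl
      · simp only [Option.some.injEq] at h
        subst h
        simp [pvSkipInner, hl]
      · simp only [Option.map_eq_some_iff] at h
        obtain ⟨j, hj, rfl⟩ := h
        simp only [pvSkipInner, hl, Bool.false_eq_true, if_false]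
        simpa using ih j hj

-- A up to the first start marker: emit the prefix, then skip, then continue
theorem pvStripA_some (lines : List (List Char)) (s : Nat)
    (h : lines.findIdx? (fun l => PySem.Chars.strip l == pvTASKS) = some s) :
    pvStripA lines = lines.take s ++ pvStripA (pvSkipInner (lines.drop (s + 1))) := by
  induction lines generalizing s with
  | nil => simp [List.findIdx?, List.findIdx?.go] at h
  | cons l rest ih =>
      rw [List.findIdx?_cons] at h
      split_ifs at h with hl
      · simp only [Option.some.injEq] at h
        subst h
        simp [pvStripA, hl]
      · simp only [Option.map_eq_some_iff] at h
        obtain ⟨j, hj, rfl⟩ := h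
        simp only [pvStripA, hl, Bool.false_eq_true, if_false, List.take_succ_cons, List.drop_succ_cons,
          List.cons_append, List.cons.injEq, true_and]
        exact ih j hj

theorem pvStripA_eq_pvGoB (lines : List (List Char)) : pvStripA lines = pvGoB lines := by
  induction lines using pvGoB.induct with
  | case1 lines h => rw [pvGoB, h, pvStripA_no_marker lines h]
  | case2 lines s hs x1 he =>
      have he' : List.findIdx? (fun l => PySem.Chars.strip l == pvENDTASKS) (lines.drop (s + 1)) = none := he
      rw [pvStripA_some lines s hs, pvSkipInner_none _ he', pvGoB, hs]
      simp only [he']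
      simp [pvStripA]
  | case3 lines s hs x1 e he ih =>
      have he' : List.findIdx? (fun l => PySem.Chars.strip l == pvENDTASKS) (lines.drop (s + 1)) = some e := he
      rw [pvStripA_some lines s hs, pvSkipInner_some _ e he', pvGoB, hs]
      simp only [he']
      exact congrArg _ ih

-- ===== VERDICT (by name: the statement is the Claim_ definition above) =====
theorem strip_task_proposals_py_spec : Claim_equal_strip_task_proposals_py := by
  intro text _
  unfold Spec_strip_task_proposals_py strip_task_proposals_py strip_task_proposals_py_alt
  rw [pvStripA_eq_pvGoB]
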